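-- pv_equiv track=rewrite | github.com/totoLab/code-ingegneria-informatica | elettrotecnica/script_esercizi/resistenze_equivalenti/tokenization.py | divide_tokens
-- ===== SOURCE A (Python) =====
-- def divide_tokens(content, token_types):
--     spaces = [" ", "\s", "\n"]
--     content = content.strip()
--     token = ""
--     while len(content) > 0 and content[0] not in spaces:
--         token += content[0]
--         content = content[1:]
--         if token in list(token_types.values()):
--             return token, content
--             """ for key in token_types:
--                 if token_types[key] == token:
--                     return key, content
--             else:
--                 RuntimeError("Found literal but can't match it") """
--
--     return token, content
-- ===== SOURCE B (Python) =====
-- def divide_tokens(content, token_types):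
--     # Index pointer over the stripped string; token_types values collected once as a set.
--     s = content.strip()
--     values = set(token_types.values())
--     i, n = 0, len(s)
--     while i < n and s[i] != " " and s[i] != "\n":
--         i += 1
--         if s[:i] in values:
--             break
--     return s[:i], s[i:]
-- ===== Notes on version B (the rewrite author's own statement) =====
-- stated objective: alternative
-- what changed: B walks an index pointer over the stripped string and checks prefixes against a set of values built once, instead of rebuilding the remaining string by slicing and recomputing list(token_types.values()) on every iteration.
import Mathlib
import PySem

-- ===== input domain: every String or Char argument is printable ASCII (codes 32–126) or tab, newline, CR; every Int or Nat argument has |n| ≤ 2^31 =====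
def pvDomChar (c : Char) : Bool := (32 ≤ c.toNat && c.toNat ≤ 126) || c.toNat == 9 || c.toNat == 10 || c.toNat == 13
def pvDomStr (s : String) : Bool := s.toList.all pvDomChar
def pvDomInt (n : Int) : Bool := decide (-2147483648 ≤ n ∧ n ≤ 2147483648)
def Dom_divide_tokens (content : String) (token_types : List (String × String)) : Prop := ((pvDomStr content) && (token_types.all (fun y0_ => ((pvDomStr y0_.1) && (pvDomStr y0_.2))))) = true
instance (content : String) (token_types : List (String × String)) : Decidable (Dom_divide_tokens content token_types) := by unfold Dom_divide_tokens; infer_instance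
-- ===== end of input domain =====

-- ===== PORT A =====
-- B: index pointer over the stripped string + token-type values collected once as a set (vs A's per-step slicing and list(values())).
def aSpaces : List String := [" ", "\\s", "\n"]

def aLoop (values : List String) (token : String) (content : List Char) : String × String :=
  match content with
  | [] => (token, String.ofList content)
  | c :: rest =>
    if aSpaces.contains (String.ofList [c]) then (token, String.ofList content)
    else
      let token' := token ++ String.ofList [c]
      if values.contains token' then (token', String.ofList rest)
      else aLoop values token' rest

def divide_tokens (content : String) (token_types : List (String × String)) : String × String :=
  aLoop (PySem.Dict.ofList token_types).values "" (PySem.Str.strip content).toList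


-- ===== PORT B =====
def bLoop (values : PySem.Set String) (s : List Char) (i : Nat) (fuel : Nat) : String × String :=
  match fuel with
  | 0 => (String.ofList (s.take i), String.ofList (s.drop i))
  | fuel' + 1 =>
    match s[i]? with
    | none => (String.ofList (s.take i), String.ofList (s.drop i))
    | some c =>
      if c = ' ' ∨ c = '\n' then (String.ofList (s.take i), String.ofList (s.drop i))
      else
        let i' := i + 1
        if PySem.Set.contains values (String.ofList (s.take i')) then
          (String.ofList (s.take i'), String.ofList (s.drop i'))
        else bLoop values s i' fuel'

def divide_tokens_alt (content : String) (token_types : List (String × String)) : String × String :=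
  let s := (PySem.Str.strip content).toList
  let values := PySem.Set.ofList (PySem.Dict.ofList token_types).values
  bLoop values s 0 s.length


-- ===== PRECONDITION & SPEC =====
def Spec_divide_tokens (content : String) (token_types : List (String × String)) (out : String × String) : Prop := out = divide_tokens_alt content token_types
instance (content : String) (token_types : List (String × String)) (out : String × String) : Decidable (Spec_divide_tokens content token_types out) := by unfold Spec_divide_tokens; infer_instance

-- ===== CLAIM (what is proved, stated in full; the proofs are below) =====
def Claim_equal_divide_tokens : Prop := ∀ (content : String) (token_types : List (String × String)), Dom_divide_tokens content token_types → Spec_divide_tokens content token_types (divide_tokens content token_types)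

-- ===== LEMMAS AND PROOFS =====

lemma ofList_inj {a b : List Char} : String.ofList a = String.ofList b ↔ a = b := by
  constructor
  · intro h; have := congrArg String.toList h; simpa using this
  · intro h; rw [h]

lemma spaces_mem (c : Char) : (String.ofList [c] ∈ aSpaces) ↔ (c = ' ' ∨ c = '\n') := by
  simp only [aSpaces, List.mem_cons, List.not_mem_nil, or_false,
    show (" " : String) = String.ofList [' '] from rfl,
    show ("\\s" : String) = String.ofList ['\\', 's'] from rfl,
    show ("\n" : String) = String.ofList ['\n'] from rfl, ofList_inj]
  simp

lemma set_mem (vs : List String) (t : String) :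
    PySem.Set.contains (PySem.Set.ofList vs) t = true ↔ t ∈ vs := by
  simp [PySem.Set.contains_eq_listContains, PySem.Set.mem_ofList]

lemma take_succ_get (s : List Char) (i : Nat) (h : i < s.length) :
    s.take (i + 1) = s.take i ++ [s[i]] := by
  rw [List.take_add_one, List.getElem?_eq_getElem h]; rfl

lemma loops_eq (vs : List String) (s : List Char) :
    ∀ fuel i, fuel = s.length - i →
      bLoop (PySem.Set.ofList vs) s i fuel =
        aLoop vs (String.ofList (s.take i)) (s.drop i) := by
  intro fuel
  induction fuel with
  | zero =>
    intro i h
    have hle : s.length ≤ i := by omega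
    have hd : s.drop i = [] := List.drop_eq_nil_of_le hle
    simp [bLoop, aLoop, hd]
  | succ fuel' ih =>
    intro i h
    have hlt : i < s.length := by omega
    have hget : s[i]? = some s[i] := List.getElem?_eq_getElem hlt
    have hdrop : s.drop i = s[i] :: s.drop (i + 1) := List.drop_eq_getElem_cons hlt
    have htake := take_succ_get s i hlt
    by_cases hsp : s[i] = ' ' ∨ s[i] = '\n'
    · have ha : aSpaces.contains (String.ofList [s[i]]) = true := by
        simp only [List.contains_iff_mem, spaces_mem]; exact hsp
      conv_lhs => rw [bLoop]
      conv_rhs => rw [hdrop, aLoop, ha]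
      simp only [hget, if_pos hsp, if_true, ← hdrop]
    · have ha : aSpaces.contains (String.ofList [s[i]]) = false := by
        rw [Bool.eq_false_iff]
        intro hb
        exact hsp ((spaces_mem _).mp (List.contains_iff_mem.mp hb))
      have hcat : String.ofList (s.take i) ++ String.ofList [s[i]] = String.ofList (s.take (i + 1)) := by
        rw [htake, String.ofList_append]
      conv_rhs => rw [hdrop, aLoop, ha]
      simp only [Bool.false_eq_true, if_false, hcat]
      conv_lhs => rw [bLoop]
      simp only [hget, if_neg hsp]
      by_cases hv : String.ofList (s.take (i + 1)) ∈ vs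
      · have h1 : PySem.Set.contains (PySem.Set.ofList vs) (String.ofList (s.take (i + 1))) = true :=
          (set_mem _ _).mpr hv
        have h2 : vs.contains (String.ofList (s.take (i + 1))) = true := by
          simp only [List.contains_iff_mem]; exact hv
        rw [h1, h2]; simp
      · have h1 : PySem.Set.contains (PySem.Set.ofList vs) (String.ofList (s.take (i + 1))) = false := by
          rw [Bool.eq_false_iff]
          intro hb
          exact hv ((set_mem _ _).mp hb)
        have h2 : vs.contains (String.ofList (s.take (i + 1))) = false := by
          rw [Bool.eq_false_iff]
          intro hb
          exact hv (List.contains_iff_mem.mp hb)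
        rw [h1, h2]
        simp only [Bool.false_eq_true, if_false]
        exact ih (i + 1) (by omega)

-- ===== VERDICT (by name: the statement is the Claim_ definition above) =====
theorem divide_tokens_spec : Claim_equal_divide_tokens := by
  intro content token_types _
  unfold Spec_divide_tokens divide_tokens divide_tokens_alt
  have h := loops_eq (PySem.Dict.ofList token_types).values ((PySem.Str.strip content).toList)
    ((PySem.Str.strip content).toList).length 0 (by omega)
  simpa using h.symm
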